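-- pv_equiv track=rewrite | github.com/bassmastre/ai_paper_reivew | src/folder_meta_generator.py | group_papers_by_folder
-- ===== SOURCE A (Python) =====
-- from collections import defaultdict
--
-- def clean_cell(value: str) -> str:
--     """
--     Remove markdown code quotes and extra spaces.
--     """
--     return value.strip().strip("`").strip()
--
-- def group_papers_by_folder(
--     papers: list[dict[str, str]],
-- ) -> dict[str, list[dict[str, str]]]:
--     grouped: dict[str, list[dict[str, str]]] = defaultdict(list)
--
--     for paper in papers:
--         folder = clean_cell(paper.get("Folder", ""))
--
--         if not folder:
--             continue
--
--         grouped[folder].append(paper)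
--
--     return grouped
-- ===== SOURCE B (Python) =====
-- from collections import defaultdict
--
-- def clean_cell(value: str) -> str:
--     return value.strip().strip("`").strip()
--
-- def group_papers_by_folder(papers):
--     # map -> filter -> ordered dedup of keys -> one dict comprehension per key
--     pairs = [(clean_cell(p.get("Folder", "")), p) for p in papers]
--     pairs = [(f, p) for (f, p) in pairs if f]
--     keys = list(dict.fromkeys(f for (f, _) in pairs))
--     return defaultdict(list, {k: [p for (f, p) in pairs if f == k] for k in keys})
-- ===== Notes on version B (the rewrite author's own statement) =====
-- stated objective: alternative
-- what changed: Replaces A's single pass that mutates a defaultdict with a map/filter of (cleaned-folder, paper) pairs, an ordered dedup of the keys, and a per-key filter comprehension building the result dict directly.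
import Mathlib
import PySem

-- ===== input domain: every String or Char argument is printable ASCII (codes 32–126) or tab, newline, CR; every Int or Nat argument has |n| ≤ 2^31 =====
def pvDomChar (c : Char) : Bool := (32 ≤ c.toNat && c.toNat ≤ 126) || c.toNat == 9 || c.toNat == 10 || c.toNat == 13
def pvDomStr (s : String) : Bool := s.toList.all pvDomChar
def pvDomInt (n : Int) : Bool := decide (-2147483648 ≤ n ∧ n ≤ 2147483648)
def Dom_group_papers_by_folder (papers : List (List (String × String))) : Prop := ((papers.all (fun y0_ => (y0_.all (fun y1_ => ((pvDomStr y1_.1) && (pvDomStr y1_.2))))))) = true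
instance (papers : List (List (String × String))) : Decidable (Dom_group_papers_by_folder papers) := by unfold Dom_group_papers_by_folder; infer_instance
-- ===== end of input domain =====

-- B restates A by a map/filter + ordered key-dedup + per-key filter decomposition (alternative; same results).
-- ===== PORT A =====
-- clean_cell: value.strip().strip("`").strip()
def cleanCell (value : String) : String :=
  PySem.Str.strip (PySem.Str.stripChars (PySem.Str.strip value) "`")

-- paper.get("Folder", "") on the association-list representation of the dict
def pyGet (paper : List (String × String)) (k dflt : String) : String :=
  PySem.Dict.getD (PySem.Dict.mk paper : PySem.Dict String String) k dflt

def group_papers_by_folder (papers : List (List (String × String))) : List (String × List (List (String × String))) :=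
  (papers.foldl
    (fun (grouped : PySem.Dict String (List (List (String × String)))) (paper : List (String × String)) =>
      let folder : String := cleanCell (pyGet paper "Folder" "")
      if folder = "" then grouped
      else PySem.Dict.modify grouped folder [] (· ++ [paper]))
    PySem.Dict.empty).items

-- ===== PORT B =====
def group_papers_by_folder_alt (papers : List (List (String × String))) : List (String × List (List (String × String))) :=
  let pairs : List (String × List (String × String)) :=
    papers.map (fun p => (cleanCell (pyGet p "Folder" ""), p))
  let pairs := pairs.filter (fun q => !(q.1 == ""))
  let keys := PySem.List.dedup (pairs.map (·.1))
  keys.map (fun k => (k, (pairs.filter (fun q => q.1 == k)).map (·.2)))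
-- ===== PRECONDITION & SPEC =====
def Spec_group_papers_by_folder (papers : List (List (String × String))) (out : List (String × List (List (String × String)))) : Prop := out = group_papers_by_folder_alt papers
instance (papers : List (List (String × String))) (out : List (String × List (List (String × String)))) : Decidable (Spec_group_papers_by_folder papers out) := by unfold Spec_group_papers_by_folder; infer_instance

-- ===== CLAIM (what is proved, stated in full; the proofs are below) =====
def Claim_equal_group_papers_by_folder : Prop := ∀ (papers : List (List (String × String))), Dom_group_papers_by_folder papers → Spec_group_papers_by_folder papers (group_papers_by_folder papers)

-- ===== LEMMAS AND PROOFS =====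
-- A's loop equals the modify-loop over B's filtered pair list.
theorem foldA_eq_foldPairs (papers : List (List (String × String)))
    (d : PySem.Dict String (List (List (String × String)))) :
    papers.foldl
      (fun (grouped : PySem.Dict String (List (List (String × String)))) (paper : List (String × String)) =>
        let folder : String := cleanCell (pyGet paper "Folder" "")
        if folder = "" then grouped
        else PySem.Dict.modify grouped folder [] (· ++ [paper])) d
    = ((papers.map (fun p => (cleanCell (pyGet p "Folder" ""), p))).filter
        (fun q => !(q.1 == ""))).foldl
        (fun grouped q => grouped.modify q.1 [] (· ++ [q.2])) d := by
  induction papers generalizing d with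
  | nil => rfl
  | cons p ps ih =>
    simp only [List.map_cons, List.filter_cons, List.foldl_cons]
    by_cases h : cleanCell (pyGet p "Folder" "") = ""
    · simp [h, ih]
    · simp [h, ih]

-- ===== VERDICT (by name: the statement is the Claim_ definition above) =====
theorem group_papers_by_folder_spec : Claim_equal_group_papers_by_folder := by
  intro papers _
  unfold Spec_group_papers_by_folder group_papers_by_folder group_papers_by_folder_alt
  rw [foldA_eq_foldPairs]
  set pairs := ((papers.map (fun p => (cleanCell (pyGet p "Folder" ""), p))).filter
      (fun q => !(q.1 == ""))) with hpairs
  have hnd : ((pairs.foldl (fun grouped q => grouped.modify q.1 [] (· ++ [q.2]))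
      PySem.Dict.empty).keys).Nodup :=
    PySem.Dict.nodup_keys_foldl_modify_key pairs Prod.fst [] (fun _ q => (· ++ [q.2]))
      PySem.Dict.empty (by simp)
  rw [PySem.Dict.items_eq_map_keys _ hnd ([] : List (List (String × String)))]
  rw [PySem.Dict.keys_foldl_modify_key]
  have hkeys : PySem.Set.update (PySem.Dict.empty
      (ν := List (List (String × String)))).keys (pairs.map Prod.fst)
      = PySem.List.dedup (pairs.map (·.1)) := by
    simp [PySem.Set.update, PySem.Set.ofList, PySem.Dict.keys_empty, PySem.List.dedup_eq_ofList]
  rw [hkeys]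
  refine List.map_congr_left (fun k _ => ?_)
  rw [PySem.Dict.getD_foldl_modify_append, PySem.Dict.getD_empty, List.nil_append]
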